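-- pv_equiv track=rewrite | github.com/LuongNguyenSep14/Search-Algoithm | 19120571_19120573/Source/Utility.py | extract_point
-- ===== SOURCE A (Python) =====
-- def extract_point(matrix):
--     start = None
--     end = None
--     for i in range(len(matrix)):
--         for j in range(len(matrix[0])):
--             if matrix[i][j] == 'S':
--                 start = (i, j)
--
--             elif matrix[i][j] == ' ':
--                 if (i == 0) or (i == len(matrix) - 1) or (j == 0) or (j == len(matrix[0]) - 1):
--                     end = (i, j)
--
--             else:
--                 pass
--     return start, end
-- ===== SOURCE B (Python) =====
-- def extract_point(matrix):
--     if not matrix: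
--         return None, None
--     h = len(matrix)
--     w = len(matrix[0])
--     # pass 1: last 'S' in the w-column-wide scan
--     start = None
--     for i in range(h):
--         row = matrix[i]
--         for j in range(w):
--             if row[j] == 'S':
--                 start = (i, j)
--     # pass 2: walk only the border cells, in row-major order
--     border = [(0, j) for j in range(w)]
--     for i in range(1, h - 1):
--         if w > 0:
--             border.append((i, 0))
--         if w > 1:
--             border.append((i, w - 1))
--     if h > 1:
--         border.extend((h - 1, j) for j in range(w))
--     end = None
--     for (i, j) in border:
--         if matrix[i][j] == ' ':
--             end = (i, j)
--     return start, end
-- ===== Notes on version B (the rewrite author's own statement) =====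
-- stated objective: alternative
-- what changed: B splits A's single fused double loop into two passes: a full scan for the last 'S' and a separate walk over only the border cells (row 0, interior edges, last row) for the last blank border cell, instead of testing the border condition on every interior cell.
import Mathlib
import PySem

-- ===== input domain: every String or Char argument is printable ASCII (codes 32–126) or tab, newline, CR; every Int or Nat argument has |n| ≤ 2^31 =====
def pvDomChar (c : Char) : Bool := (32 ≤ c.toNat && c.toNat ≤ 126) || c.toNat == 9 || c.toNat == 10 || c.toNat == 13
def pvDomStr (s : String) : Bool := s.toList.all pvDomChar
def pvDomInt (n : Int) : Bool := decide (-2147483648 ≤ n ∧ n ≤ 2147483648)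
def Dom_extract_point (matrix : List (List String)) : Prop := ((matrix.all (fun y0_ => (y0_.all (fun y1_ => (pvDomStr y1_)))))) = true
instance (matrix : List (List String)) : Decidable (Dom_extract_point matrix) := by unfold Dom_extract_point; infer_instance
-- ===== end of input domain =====

-- B does the same job by a different decomposition: one full scan for the last 'S',
-- then a separate walk over only the border cells for the last blank border cell.

-- ===== PORT A =====
def extract_point (matrix : List (List String)) : (Option (Int × Int)) × (Option (Int × Int)) :=
  (PySem.List.pyRange 0 (matrix.length : Int) 1).foldl
    (fun st i =>
      (PySem.List.pyRange 0 ((PySem.List.pyGetD matrix 0 []).length : Int) 1).foldl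
        (fun st j =>
          if PySem.List.pyGetD (PySem.List.pyGetD matrix i []) j "" = "S" then
            (some (i, j), st.2)
          else if PySem.List.pyGetD (PySem.List.pyGetD matrix i []) j "" = " " then
            (if i = 0 ∨ i = (matrix.length : Int) - 1 ∨ j = 0 ∨
                j = ((PySem.List.pyGetD matrix 0 []).length : Int) - 1
             then (st.1, some (i, j)) else st)
          else st)
        st)
    (none, none)

-- ===== PORT B =====
def extract_point_alt (matrix : List (List String)) : (Option (Int × Int)) × (Option (Int × Int)) :=
  if matrix = [] then (none, none) else
  let h : Int := matrix.length
  let w : Int := (PySem.List.pyGetD matrix 0 []).length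
  let start := (PySem.List.pyRange 0 h 1).foldl
    (fun st i =>
      let row := PySem.List.pyGetD matrix i []
      (PySem.List.pyRange 0 w 1).foldl
        (fun st j => if PySem.List.pyGetD row j "" = "S" then some (i, j) else st) st)
    none
  let border : List (Int × Int) :=
    ((PySem.List.pyRange 0 w 1).map (fun j => ((0 : Int), j)))
    ++ ((PySem.List.pyRange 1 (h - 1) 1).foldl
          (fun acc i =>
            (acc ++ (if w > 0 then [(i, (0 : Int))] else []))
              ++ (if w > 1 then [(i, w - 1)] else [])) [])
    ++ (if h > 1 then (PySem.List.pyRange 0 w 1).map (fun j => (h - 1, j)) else [])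
  let endp := border.foldl
    (fun st c =>
      if PySem.List.pyGetD (PySem.List.pyGetD matrix c.1 []) c.2 "" = " " then some c else st)
    none
  (start, endp)

-- ===== PRECONDITION & SPEC =====
-- Pre_ excludes exactly the ragged grids on which Python A raises IndexError:
-- some row shorter than row 0 (A indexes every row up to len(matrix[0])).
def Pre_extract_point (matrix : List (List String)) : Prop :=
  ∀ r ∈ matrix, (PySem.List.pyGetD matrix 0 []).length ≤ r.length
instance (matrix : List (List String)) : Decidable (Pre_extract_point matrix) := by
  unfold Pre_extract_point; infer_instance
def pvWitness_extract_point : List (List String) := [["S", " "], ["x", " "]]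
def Spec_extract_point (matrix : List (List String)) (out : (Option (Int × Int)) × (Option (Int × Int))) : Prop := out = extract_point_alt matrix
instance (matrix : List (List String)) (out : (Option (Int × Int)) × (Option (Int × Int))) : Decidable (Spec_extract_point matrix out) := by unfold Spec_extract_point; infer_instance

-- ===== CLAIM (what is proved, stated in full; the proofs are below) =====
def Claim_equal_extract_point : Prop := ∀ (matrix : List (List String)), Dom_extract_point matrix → Pre_extract_point matrix → Spec_extract_point matrix (extract_point matrix)

-- ===== LEMMAS AND PROOFS =====

-- the value of cell (i, j), with the out-of-range default both ports use
def pvCell (matrix : List (List String)) (i j : Int) : String :=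
  PySem.List.pyGetD (PySem.List.pyGetD matrix i []) j ""

def pvStepS (matrix : List (List String)) (st : Option (Int × Int)) (c : Int × Int) :
    Option (Int × Int) :=
  if pvCell matrix c.1 c.2 = "S" then some c else st

def pvStepE (matrix : List (List String)) (st : Option (Int × Int)) (c : Int × Int) :
    Option (Int × Int) :=
  if pvCell matrix c.1 c.2 = " " then some c else st

-- row-major list of all cells A scans
def pvCells (h w : Int) : List (Int × Int) :=
  (PySem.List.pyRange 0 h 1).flatMap
    (fun i => (PySem.List.pyRange 0 w 1).map (fun j => (i, j)))

-- the border test as A writes it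
def pvBorder (h w : Int) (c : Int × Int) : Bool :=
  decide (c.1 = 0 ∨ c.1 = h - 1 ∨ c.2 = 0 ∨ c.2 = w - 1)

-- the list B builds
def pvBorderList (h w : Int) : List (Int × Int) :=
  ((PySem.List.pyRange 0 w 1).map (fun j => ((0 : Int), j)))
  ++ (PySem.List.pyRange 1 (h - 1) 1).flatMap
       (fun i => (if w > 0 then [(i, (0 : Int))] else [])
                   ++ (if w > 1 then [(i, w - 1)] else []))
  ++ (if h > 1 then (PySem.List.pyRange 0 w 1).map (fun j => (h - 1, j)) else [])

theorem pv_foldl_pair {α β γ : Type} (f1 : α → γ → α) (f2 : β → γ → β)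
    (l : List γ) (a : α) (b : β) :
    l.foldl (fun p c => (f1 p.1 c, f2 p.2 c)) (a, b) =
      (l.foldl f1 a, l.foldl f2 b) := by
  induction l generalizing a b with
  | nil => rfl
  | cons x xs ih => simp [List.foldl_cons, ih]

theorem pv_foldl_flatMap {α β γ : Type} (f : β → γ → β) (g : α → List γ)
    (l : List α) (init : β) :
    (l.flatMap g).foldl f init = l.foldl (fun acc x => (g x).foldl f acc) init := by
  induction l generalizing init with
  | nil => rfl
  | cons x xs ih => simp [List.flatMap_cons, List.foldl_append, ih]

theorem pv_filter_flatMap {α β : Type} (p : β → Bool) (g : α → List β) (l : List α) :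
    (l.flatMap g).filter p = l.flatMap (fun x => (g x).filter p) := by
  induction l with
  | nil => rfl
  | cons x xs ih => simp [List.flatMap_cons, List.filter_append, ih]

theorem pv_foldl_two_appends {α β : Type} (g1 g2 : α → List β) (l : List α) (acc : List β) :
    l.foldl (fun acc x => (acc ++ g1 x) ++ g2 x) acc
      = acc ++ l.flatMap (fun x => g1 x ++ g2 x) := by
  induction l generalizing acc with
  | nil => simp
  | cons x xs ih => simp [List.foldl_cons, List.flatMap]

theorem pv_flatMap_congr {α β : Type} {f g : α → List β} {l : List α}
    (h : ∀ x ∈ l, f x = g x) : l.flatMap f = l.flatMap g := by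
  induction l with
  | nil => rfl
  | cons x xs ih =>
      simp only [List.flatMap_cons, h x (List.mem_cons_self ..),
        ih (fun y hy => h y (List.mem_cons_of_mem _ hy))]

theorem pv_range_single (a b : Int) (h1 : a < b) (h2 : b ≤ a + 1) :
    PySem.List.pyRange a b 1 = [a] := by
  rw [PySem.List.pyRange_one_cons h1, PySem.List.pyRange_one_eq_nil h2]

-- a full row at a border row index survives the filter unchanged
theorem pv_row_all_border (h w i : Int) (hi : i = 0 ∨ i = h - 1) :
    ((PySem.List.pyRange 0 w 1).map (fun j => (i, j))).filter (pvBorder h w)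
      = (PySem.List.pyRange 0 w 1).map (fun j => (i, j)) := by
  apply List.filter_eq_self.mpr
  intro c hc
  rcases List.mem_map.mp hc with ⟨j, _, rfl⟩
  simp [pvBorder]
  tauto

-- an interior row keeps only its first and last cell
theorem pv_row_mid (h w i : Int) (hi0 : i ≠ 0) (hi1 : i ≠ h - 1) :
    ((PySem.List.pyRange 0 w 1).map (fun j => (i, j))).filter (pvBorder h w)
      = (if w > 0 then [(i, (0 : Int))] else []) ++ (if w > 1 then [(i, w - 1)] else []) := by
  by_cases hw0 : w ≤ 0
  · rw [PySem.List.pyRange_one_eq_nil hw0]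
    simp [show ¬ (w > 0) by omega, show ¬ (w > 1) by omega]
  · by_cases hw1 : w = 1
    · subst hw1
      rw [pv_range_single 0 1 (by omega) (by omega)]
      simp [pvBorder, hi0, hi1]
    · have h2 : (2 : Int) ≤ w := by omega
      rw [PySem.List.pyRange_one_append 0 1 w (by omega) (by omega),
        PySem.List.pyRange_one_append 1 (w - 1) w (by omega) (by omega),
        pv_range_single 0 1 (by omega) (by omega),
        pv_range_single (w - 1) w (by omega) (by omega)]
      have hmid : ((PySem.List.pyRange 1 (w - 1) 1).map (fun j => (i, j))).filter
          (pvBorder h w) = [] := by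
        apply List.filter_eq_nil_iff.mpr
        intro c hc
        rcases List.mem_map.mp hc with ⟨j, hj, rfl⟩
        have := PySem.List.mem_pyRange_one.mp hj
        simp [pvBorder, hi0, hi1]
        omega
      simp only [List.map_append, List.filter_append, hmid]
      simp [pvBorder, hi0, hi1, show ¬ (0 : Int) = w - 1 by omega,
        show (0 : Int) < w by omega, show (1 : Int) < w by omega]

theorem pv_cells_filter (h w : Int) (hh : 1 ≤ h) :
    (pvCells h w).filter (pvBorder h w) = pvBorderList h w := by
  unfold pvCells pvBorderList
  rw [pv_filter_flatMap]
  by_cases h1 : h = 1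
  · subst h1
    rw [pv_range_single 0 1 (by omega) (by omega)]
    simp only [List.flatMap_cons, List.flatMap_nil, List.append_nil]
    rw [pv_row_all_border 1 w 0 (Or.inl rfl)]
    norm_num
  · have h2 : (2 : Int) ≤ h := by omega
    rw [PySem.List.pyRange_one_append 0 1 h (by omega) (by omega),
      PySem.List.pyRange_one_append 1 (h - 1) h (by omega) (by omega),
      pv_range_single 0 1 (by omega) (by omega),
      pv_range_single (h - 1) h (by omega) (by omega)]
    simp only [List.flatMap_append, List.flatMap_cons, List.flatMap_nil, List.append_nil]
    rw [pv_row_all_border h w 0 (Or.inl rfl), pv_row_all_border h w (h - 1) (Or.inr rfl)]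
    rw [pv_flatMap_congr (fun i hi => by
      have := PySem.List.mem_pyRange_one.mp hi
      exact pv_row_mid h w i (by omega) (by omega))]
    simp [show h > 1 by omega, List.append_assoc]

-- A is the pair of a start-fold and an end-fold over the filtered cell list
theorem pv_A_eq (matrix : List (List String)) :
    extract_point matrix =
      ((pvCells (matrix.length : Int) ((PySem.List.pyGetD matrix 0 []).length : Int)).foldl
          (pvStepS matrix) none,
        ((pvCells (matrix.length : Int) ((PySem.List.pyGetD matrix 0 []).length : Int)).filter
            (pvBorder (matrix.length : Int) ((PySem.List.pyGetD matrix 0 []).length : Int))).foldl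
          (pvStepE matrix) none) := by
  rw [← PySem.List.foldl_if_eq_foldl_filter, ← pv_foldl_pair]
  unfold extract_point pvCells
  rw [pv_foldl_flatMap]
  congr 1
  funext st i
  rw [List.foldl_map]
  congr 1
  funext p c
  simp only [pvStepS, pvStepE, pvCell, pvBorder]
  split_ifs with hS hE hB hB' <;> simp_all

-- B is the pair of the same start-fold and an end-fold over B's border list
theorem pv_B_eq (matrix : List (List String)) (hm : matrix ≠ []) :
    extract_point_alt matrix =
      ((pvCells (matrix.length : Int) ((PySem.List.pyGetD matrix 0 []).length : Int)).foldl
          (pvStepS matrix) none,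
        (pvBorderList (matrix.length : Int) ((PySem.List.pyGetD matrix 0 []).length : Int)).foldl
          (pvStepE matrix) none) := by
  unfold extract_point_alt
  rw [if_neg hm]
  simp only []
  congr 1
  · unfold pvCells
    rw [pv_foldl_flatMap]
    congr 1
    funext st i
    rw [List.foldl_map]
    rfl
  · unfold pvBorderList
    rw [pv_foldl_two_appends]
    simp only [List.nil_append]
    rfl

-- ===== VERDICT (by name: the statement is the Claim_ definition above) =====
theorem extract_point_spec : Claim_equal_extract_point := by
  intro matrix _ _
  unfold Spec_extract_point
  by_cases hm : matrix = []
  · subst hm; rfl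
  · rw [pv_A_eq, pv_B_eq matrix hm,
      pv_cells_filter _ _ (by
        have : 0 < matrix.length := List.length_pos_iff.mpr hm
        omega)]
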